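-- pv_equiv track=rewrite | github.com/VermaNisha36/Python-Infytq | Assignment-05/3.py | check_double
-- ===== SOURCE A (Python) =====
-- def check_double(number):
--     x= [int(a) for a in str(number)]
--     number=int(number)
--     double=int(number*2)
--     y= [int(a) for a in str(double)]
--     x=sorted(x)
--     y=sorted(y)
--     if len(x)==len(y) and x==y:
--         return True
--     else:
--         return False
-- ===== SOURCE B (Python) =====
-- from collections import Counter
--
-- def check_double(number):
--     x = [int(a) for a in str(number)]
--     number = int(number)
--     double = int(number*2)
--     y = [int(a) for a in str(double)]
--     return Counter(x) == Counter(y)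
-- ===== Notes on version B (the rewrite author's own statement) =====
-- stated objective: idiomatic
-- what changed: Replaces the sort-both-lists-then-compare (with a redundant length guard) by comparing digit frequency tables (collections.Counter equality), maintaining counts instead of a sorted order.
import Mathlib
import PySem

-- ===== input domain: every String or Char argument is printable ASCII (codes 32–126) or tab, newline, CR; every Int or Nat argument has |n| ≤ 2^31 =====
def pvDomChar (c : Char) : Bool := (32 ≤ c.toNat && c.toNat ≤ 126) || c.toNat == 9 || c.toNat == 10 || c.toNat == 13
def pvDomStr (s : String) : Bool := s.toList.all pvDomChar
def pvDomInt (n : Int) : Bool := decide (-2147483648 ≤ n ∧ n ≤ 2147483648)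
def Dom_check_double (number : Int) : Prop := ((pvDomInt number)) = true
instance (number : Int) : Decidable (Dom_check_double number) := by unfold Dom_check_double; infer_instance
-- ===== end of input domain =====

-- B replaces A's sort-both-digit-lists-and-compare by a digit-frequency (Counter) comparison (idiomatic).


-- ===== PORT A =====
-- [int(a) for a in str(n)] : shared by both sources verbatim; exact for n ≥ 0 (Pre_);
-- for n < 0 Python raises ValueError on the '-' character (excluded by Pre_).
def pvDigits (n : Int) : List Int :=
  (PySem.Int.toChars n).map (fun a => (PySem.Int.ofChars? [a]).getD 0)

def check_double (number : Int) : Bool :=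
  let x := pvDigits number
  let double := number * 2
  let y := pvDigits double
  let x := PySem.List.sorted x (fun v => v) false
  let y := PySem.List.sorted y (fun v => v) false
  if x.length = y.length ∧ x = y then true else false

-- ===== PORT B =====
-- Counter(x) == Counter(y) ported as dict equality of the two counters:
-- every key of either counter has equal multiplicity in x and y.
def check_double_alt (number : Int) : Bool :=
  let x := pvDigits number
  let double := number * 2
  let y := pvDigits double
  x.all (fun a => PySem.List.count x a == PySem.List.count y a) &&
  y.all (fun b => PySem.List.count x b == PySem.List.count y b)

-- ===== PRECONDITION & SPEC =====
-- A (and B) raise ValueError on negative numbers: str(-5) contains '-', and int('-') fails.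
def Pre_check_double (number : Int) : Prop := 0 ≤ number
instance (number : Int) : Decidable (Pre_check_double number) := by unfold Pre_check_double; infer_instance
def pvWitness_check_double : Int := 125874

def Spec_check_double (number : Int) (out : Bool) : Prop := out = check_double_alt number
instance (number : Int) (out : Bool) : Decidable (Spec_check_double number out) := by unfold Spec_check_double; infer_instance

-- ===== CLAIM (what is proved, stated in full; the proofs are below) =====
def Claim_equal_check_double : Prop := ∀ (number : Int), Dom_check_double number → Pre_check_double number → Spec_check_double number (check_double number)

-- ===== LEMMAS AND PROOFS =====

-- multiset equality checked on the members of both lists equals full count-equality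
theorem pv_count_all_iff (x y : List Int) :
    (x.all (fun a => PySem.List.count x a == PySem.List.count y a) &&
     y.all (fun b => PySem.List.count x b == PySem.List.count y b)) = true ↔ x.Perm y := by
  simp only [Bool.and_eq_true, List.all_eq_true, beq_iff_eq, PySem.List.count_eq]
  constructor
  · rintro ⟨hx, hy⟩
    rw [List.perm_iff_count]
    intro a
    by_cases hax : a ∈ x
    · exact hx a hax
    · by_cases hay : a ∈ y
      · exact hy a hay
      · rw [List.count_eq_zero_of_not_mem hax, List.count_eq_zero_of_not_mem hay]
  · intro hp
    have h := List.perm_iff_count.mp hp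
    exact ⟨fun a _ => h a, fun b _ => h b⟩

theorem pv_main (x y : List Int) :
    (if (PySem.List.sorted x (fun v => v) false).length = (PySem.List.sorted y (fun v => v) false).length ∧
        PySem.List.sorted x (fun v => v) false = PySem.List.sorted y (fun v => v) false then true else false) =
    (x.all (fun a => PySem.List.count x a == PySem.List.count y a) &&
     y.all (fun b => PySem.List.count x b == PySem.List.count y b)) := by
  by_cases hp : x.Perm y
  · rw [if_pos, (pv_count_all_iff x y).mpr hp]
    have hs := PySem.List.sorted_id_eq_sorted_id_iff_perm (xs := x) (ys := y) |>.mpr hp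
    exact ⟨by rw [hs], hs⟩
  · rw [if_neg, eq_comm]
    · simpa using fun h => hp ((pv_count_all_iff x y).mp h)
    · rintro ⟨-, hs⟩
      exact hp ((PySem.List.sorted_id_eq_sorted_id_iff_perm (xs := x) (ys := y)).mp hs)

-- ===== VERDICT (by name: the statement is the Claim_ definition above) =====
theorem check_double_spec : Claim_equal_check_double := by
  intro number _ _
  unfold Spec_check_double check_double check_double_alt
  exact pv_main (pvDigits number) (pvDigits (number * 2))
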